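-- pv_equiv track=rewrite | github.com/crufinition/Sudoku_Solver | sudoku_env/tools.py | single_check
-- ===== SOURCE A (Python) =====
-- def single_check(bag):
--     '''Return False only if the given row, column, or grid is illegal
--
--     ==== Parameter ====
--     bag: the numbers of a row, a column, or a grid'''
--     candidates = [str(i) for i in range(1,10)]
--     for i in bag:
--         if i in candidates:
--             candidates.remove(i)
--         elif i != "0":
--             return False
--     return True
-- ===== SOURCE B (Python) =====
-- def single_check(bag):
--     '''Return False only if the given row, column, or grid is illegal
--
--     ==== Parameter ====
--     bag: the numbers of a row, a column, or a grid'''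
--     counts = {}
--     for x in bag:
--         if x != "0":
--             counts[x] = counts.get(x, 0) + 1
--     valid = {"1", "2", "3", "4", "5", "6", "7", "8", "9"}
--     for k, c in counts.items():
--         if k not in valid or c > 1:
--             return False
--     return True
-- ===== Notes on version B (the rewrite author's own statement) =====
-- stated objective: alternative
-- what changed: Replaced the consuming remove-from-candidates loop by two separate passes: first build a frequency dict over the non-'0' elements, then validate that every key is one of '1'..'9' and occurs at most once.
import Mathlib
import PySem

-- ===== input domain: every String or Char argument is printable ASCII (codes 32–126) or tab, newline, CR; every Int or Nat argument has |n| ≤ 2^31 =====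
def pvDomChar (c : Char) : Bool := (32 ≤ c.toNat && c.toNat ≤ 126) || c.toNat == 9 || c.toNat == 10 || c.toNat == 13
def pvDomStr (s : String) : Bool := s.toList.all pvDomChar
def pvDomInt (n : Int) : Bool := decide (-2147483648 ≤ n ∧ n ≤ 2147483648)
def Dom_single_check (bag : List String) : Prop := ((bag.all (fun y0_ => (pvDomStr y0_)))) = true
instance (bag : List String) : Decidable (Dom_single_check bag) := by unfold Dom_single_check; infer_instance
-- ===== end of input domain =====

-- B builds a frequency dict over the non-"0" elements first, then validates keys and counts in a second pass (alternative decomposition, same cost).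

-- ===== PORT A =====
-- the loop over bag, carrying the mutable 'candidates' list
def singleCheckLoop : List String → List String → Bool
  | [], _ => true
  | i :: rest, cand =>
    if i ∈ cand then
      -- candidates.remove(i); remove? is guaranteed 'some' here since i ∈ cand
      singleCheckLoop rest ((PySem.List.remove? cand i).getD cand)
    else if i ≠ "0" then false
    else singleCheckLoop rest cand

def single_check (bag : List String) : Bool :=
  singleCheckLoop bag ((PySem.List.pyRange 1 10 1).map PySem.Int.toStr)

-- ===== PORT B =====
def single_check_alt (bag : List String) : Bool :=
  let counts := bag.foldl (fun d x => if x ≠ "0" then d.insert x (d.getD x 0 + 1) else d)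
                  (PySem.Dict.empty : PySem.Dict String Int)
  let valid := PySem.Set.ofList ["1", "2", "3", "4", "5", "6", "7", "8", "9"]
  counts.items.all (fun kc => decide (kc.1 ∈ valid) && !(decide (kc.2 > 1)))

-- ===== PRECONDITION & SPEC =====
def Spec_single_check (bag : List String) (out : Bool) : Prop := out = single_check_alt bag
instance (bag : List String) (out : Bool) : Decidable (Spec_single_check bag out) := by unfold Spec_single_check; infer_instance

-- ===== CLAIM (what is proved, stated in full; the proofs are below) =====
def Claim_equal_single_check : Prop := ∀ (bag : List String), Dom_single_check bag → Spec_single_check bag (single_check bag)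

-- ===== LEMMAS AND PROOFS =====


-- shared value-level characterisation of both programs
def pvOk (bag : List String) (cand : List String) (x : String) : Prop :=
  x = "0" ∨ (x ∈ cand ∧ bag.count x ≤ 1)

lemma count_filter_ne (l : List String) (a : String) (ha : a ≠ "0") :
    (l.filter (fun x => x ≠ "0")).count a = l.count a := by
  induction l with
  | nil => rfl
  | cons b t ih =>
    simp only [ne_eq, decide_not] at ih ⊢
    by_cases hb : b = "0"
    · simp [hb, ih, Ne.symm ha]
    · simp [hb, List.count_cons, ih]

lemma singleCheckLoop_eq (bag : List String) : ∀ (cand : List String), cand.Nodup →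
    (singleCheckLoop bag cand = true ↔ ∀ x ∈ bag, pvOk bag cand x) := by
  induction bag with
  | nil => intro cand _; simp [singleCheckLoop, pvOk]
  | cons i rest ih =>
    intro cand hnd
    by_cases hic : i ∈ cand
    · have hrm : PySem.List.remove? cand i = some (cand.erase i) :=
        PySem.List.remove?_eq_some_erase cand i hic
      rw [singleCheckLoop, if_pos hic, hrm, Option.getD_some,
        ih (cand.erase i) (hnd.erase i)]
      constructor
      · intro H x hx
        rcases List.mem_cons.mp hx with rfl | hx
        · by_cases h0 : x = "0"
          · exact Or.inl h0
          · refine Or.inr ⟨hic, ?_⟩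
            by_cases hir : x ∈ rest
            · rcases H x hir with h | ⟨hmem, _⟩
              · exact absurd h h0
              · exact absurd ((hnd.mem_erase_iff).mp hmem).1 (by simp)
            · rw [List.count_cons_self, List.count_eq_zero_of_not_mem hir]
        · rcases H x hx with h | ⟨hmem, hcnt⟩
          · exact Or.inl h
          · have hne : x ≠ i := ((hnd.mem_erase_iff).mp hmem).1
            refine Or.inr ⟨List.mem_of_mem_erase hmem, ?_⟩
            rw [List.count_cons_of_ne (Ne.symm hne)]
            exact hcnt
      · intro H x hx
        rcases H x (List.mem_cons_of_mem i hx) with h | ⟨hmem, hcnt⟩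
        · exact Or.inl h
        · have hne : x ≠ i := by
            rintro rfl
            have hp : 0 < rest.count x := List.count_pos_iff.mpr hx
            rw [List.count_cons_self] at hcnt
            omega
          refine Or.inr ⟨(hnd.mem_erase_iff).mpr ⟨hne, hmem⟩, ?_⟩
          rw [List.count_cons_of_ne (Ne.symm hne)] at hcnt
          exact hcnt
    · by_cases h0 : i = "0"
      · subst h0
        rw [singleCheckLoop, if_neg hic, if_neg (by simp), ih cand hnd]
        constructor
        · intro H x hx
          rcases List.mem_cons.mp hx with rfl | hx
          · exact Or.inl rfl
          · rcases H x hx with h | ⟨hm, hc⟩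
            · exact Or.inl h
            · by_cases hx0 : x = "0"
              · exact Or.inl hx0
              · exact Or.inr ⟨hm, by rw [List.count_cons_of_ne (Ne.symm hx0)]; exact hc⟩
        · intro H x hx
          rcases H x (List.mem_cons_of_mem _ hx) with h | ⟨hm, hc⟩
          · exact Or.inl h
          · by_cases hx0 : x = "0"
            · exact Or.inl hx0
            · exact Or.inr ⟨hm, by rwa [List.count_cons_of_ne (Ne.symm hx0)] at hc⟩
      · rw [singleCheckLoop, if_neg hic, if_pos h0]
        constructor
        · intro h; exact absurd h (by simp)
        · intro H
          rcases H i (List.mem_cons_self) with h | ⟨hm, _⟩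
          · exact absurd h h0
          · exact absurd hm hic

lemma foldl_guard (bag : List String) (d : PySem.Dict String Int) :
    bag.foldl (fun d x => if x ≠ "0" then d.insert x (d.getD x 0 + 1) else d) d
      = (bag.filter (fun x => x ≠ "0")).foldl (fun d x => d.insert x (d.getD x 0 + 1)) d := by
  induction bag generalizing d with
  | nil => rfl
  | cons b t ih =>
    rw [List.foldl_cons]
    by_cases hb : b = "0"
    · rw [if_neg (by simp [hb])]
      rw [show List.filter (fun x => decide (x ≠ "0")) (b :: t)
            = List.filter (fun x => decide (x ≠ "0")) t from by simp [hb]]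
      exact ih d
    · rw [if_pos hb]
      rw [show List.filter (fun x => decide (x ≠ "0")) (b :: t)
            = b :: List.filter (fun x => decide (x ≠ "0")) t from by simp [hb],
        List.foldl_cons]
      exact ih _

lemma alt_eq (bag : List String) :
    single_check_alt bag = true ↔
      ∀ x ∈ bag, pvOk bag (PySem.Set.ofList ["1", "2", "3", "4", "5", "6", "7", "8", "9"]) x := by
  simp only [single_check_alt]
  rw [foldl_guard, PySem.Dict.foldl_insert_getD_add_one_eq_counter _, PySem.Dict.items_counter _,
    List.all_map, List.all_eq_true]
  constructor
  · intro H x hx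
    by_cases h0 : x = "0"
    · exact Or.inl h0
    · have hxf : x ∈ PySem.Set.ofList (bag.filter (fun x => x ≠ "0")) := by
        rw [PySem.Set.mem_ofList]
        simp [List.mem_filter, hx, h0]
      have hx2 := H x hxf
      simp only [Function.comp, Bool.and_eq_true, Bool.not_eq_true', decide_eq_true_eq,
        decide_eq_false_iff_not] at hx2
      refine Or.inr ⟨hx2.1, ?_⟩
      have hc : (((bag.filter (fun x => x ≠ "0")).count x : Int)) ≤ 1 := by omega
      rw [count_filter_ne bag x h0] at hc
      exact_mod_cast hc
  · intro H x hx
    rw [PySem.Set.mem_ofList, List.mem_filter] at hx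
    obtain ⟨hxb, hx0⟩ := hx
    have hx0' : x ≠ "0" := by simpa using hx0
    rcases H x hxb with h | ⟨hm, hc⟩
    · exact absurd h hx0'
    · simp only [Function.comp, Bool.and_eq_true, Bool.not_eq_true', decide_eq_true_eq,
        decide_eq_false_iff_not]
      refine ⟨hm, ?_⟩
      rw [count_filter_ne bag x hx0']
      have : (bag.count x : Int) ≤ 1 := by exact_mod_cast hc
      omega

-- ===== VERDICT (by name: the statement is the Claim_ definition above) =====
theorem single_check_spec : Claim_equal_single_check := by
  intro bag _
  unfold Spec_single_check single_check
  rw [Bool.eq_iff_iff]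
  have h1 := singleCheckLoop_eq bag ((PySem.List.pyRange 1 10 1).map PySem.Int.toStr) (by decide)
  rw [show (PySem.List.pyRange 1 10 1).map PySem.Int.toStr
        = PySem.Set.ofList ["1", "2", "3", "4", "5", "6", "7", "8", "9"] from by decide] at h1
  exact h1.trans (alt_eq bag).symm
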